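-- pv_equiv track=rewrite | github.com/Minkov/leetcode-solutions | k-diff-pairs-in-an-array/solution.py | count_repeating
-- ===== SOURCE A (Python) =====
-- def count_repeating(nums):
--     used = set()
--     repeating = set()
--     for num in nums:
--         if num in used:
--             repeating.add(num)
--         used.add(num)
--
--     return len(repeating)
-- ===== SOURCE B (Python) =====
-- def count_repeating(nums):
--     counts = {}
--     for num in nums:
--         counts[num] = counts.get(num, 0) + 1
--     return sum(1 for c in counts.values() if c >= 2)
-- ===== Notes on version B (the rewrite author's own statement) =====
-- stated objective: alternative
-- what changed: Replaces A's incremental two-set membership logic with a build-then-scan strategy: one pass builds a frequency table, a second pass counts values >= 2 (no membership branch).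
import Mathlib
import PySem

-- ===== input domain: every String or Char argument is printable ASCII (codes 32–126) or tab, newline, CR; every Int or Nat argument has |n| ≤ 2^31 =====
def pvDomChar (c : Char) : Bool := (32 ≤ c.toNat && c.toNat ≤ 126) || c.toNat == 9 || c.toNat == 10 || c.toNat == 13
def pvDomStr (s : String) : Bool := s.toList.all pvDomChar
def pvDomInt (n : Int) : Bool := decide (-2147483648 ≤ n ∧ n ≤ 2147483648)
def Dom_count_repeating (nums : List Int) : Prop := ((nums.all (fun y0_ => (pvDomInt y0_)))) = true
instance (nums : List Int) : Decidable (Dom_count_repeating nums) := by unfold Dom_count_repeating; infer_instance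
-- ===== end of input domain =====

-- B builds a frequency table in one pass and then counts values ≥ 2, instead of A's incremental two-set membership logic; same cost, different structure.


-- ===== PORT A =====
def count_repeating (nums : List Int) : Int :=
  PySem.Set.len
    (nums.foldl
      (fun (p : PySem.Set Int × PySem.Set Int) num =>
        (PySem.Set.add p.1 num,
         if PySem.Set.contains p.1 num then PySem.Set.add p.2 num else p.2))
      (PySem.Set.empty, PySem.Set.empty)).2

-- ===== PORT B =====
def count_repeating_alt (nums : List Int) : Int :=
  ((nums.foldl (fun d x => d.insert x (d.getD x 0 + 1))
      (PySem.Dict.empty : PySem.Dict Int Int)).values.map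
    (fun c => if 2 ≤ c then (1 : Int) else 0)).sum

-- ===== PRECONDITION & SPEC =====
def Spec_count_repeating (nums : List Int) (out : Int) : Prop := out = count_repeating_alt nums
instance (nums : List Int) (out : Int) : Decidable (Spec_count_repeating nums out) := by unfold Spec_count_repeating; infer_instance

-- ===== CLAIM (what is proved, stated in full; the proofs are below) =====
def Claim_equal_count_repeating : Prop := ∀ (nums : List Int), Dom_count_repeating nums → Spec_count_repeating nums (count_repeating nums)

-- ===== LEMMAS AND PROOFS =====

-- the loop body of A's port, named for the lemmas (definitionally the lambda in count_repeating)
def pvStepA (p : PySem.Set Int × PySem.Set Int) (num : Int) : PySem.Set Int × PySem.Set Int :=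
  (PySem.Set.add p.1 num,
   if PySem.Set.contains p.1 num then PySem.Set.add p.2 num else p.2)

-- membership in the 'repeating' set after A's loop, for any start state
lemma mem_snd_foldlA (xs : List Int) (u r : PySem.Set Int) (x : Int) :
    x ∈ (xs.foldl pvStepA (u, r)).2 ↔ x ∈ r ∨ (x ∈ u ∧ x ∈ xs) ∨ 2 ≤ xs.count x := by
  induction xs generalizing u r with
  | nil => simp
  | cons n t ih =>
    simp only [List.foldl_cons, pvStepA, ih]
    by_cases hnu : n ∈ u
    · have hc : PySem.Set.contains u n = true := (PySem.Set.contains_iff u n).mpr hnu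
      by_cases hx : x = n
      · subst hx
        simp only [hc, if_pos, PySem.Set.mem_add, List.mem_cons, List.count_cons_self, hnu,
          true_and, true_or, or_true]
      · have hnx : n ≠ x := fun e => hx e.symm
        have hcnt : (n :: t).count x = t.count x := by simp [hnx]
        simp only [hc, if_pos, PySem.Set.mem_add, hcnt, List.mem_cons, hx, false_or, or_false]
    · have hc : PySem.Set.contains u n = false := by
        cases h : PySem.Set.contains u n
        · rfl
        · exact absurd ((PySem.Set.contains_iff u n).mp h) hnu
      by_cases hx : x = n
      · subst hx
        simp only [hc, Bool.false_eq_true, if_neg, PySem.Set.mem_add, List.mem_cons,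
          List.count_cons_self, hnu, not_false_iff, true_or, true_and, and_true, or_true]
        rw [show (x ∈ t) = (0 < t.count x) from propext List.count_pos_iff.symm]
        by_cases hr : x ∈ r
        · simp [hr]
        · simp only [hr, false_or]
          omega
      · have hnx : n ≠ x := fun e => hx e.symm
        have hcnt : (n :: t).count x = t.count x := by simp [hnx]
        simp only [hc, Bool.false_eq_true, if_neg, PySem.Set.mem_add, hcnt, List.mem_cons, hx,
          false_or, or_false, not_false_iff]

lemma nodup_snd_foldlA (xs : List Int) (u r : PySem.Set Int) (hr : r.Nodup) :
    (xs.foldl pvStepA (u, r)).2.Nodup := by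
  induction xs generalizing u r with
  | nil => exact hr
  | cons n t ih =>
    simp only [List.foldl_cons, pvStepA]
    apply ih
    split
    · exact PySem.Set.nodup_add r n hr
    · exact hr

-- B's value is the number of distinct elements occurring at least twice
lemma altB (nums : List Int) :
    count_repeating_alt nums =
      (((PySem.Set.ofList nums).filter (fun x => decide (2 ≤ nums.count x))).length : Int) := by
  unfold count_repeating_alt
  rw [PySem.Dict.foldl_insert_getD_add_one_eq_counter]
  simp only [PySem.Dict.values, PySem.Dict.items_counter, List.map_map]
  induction PySem.Set.ofList nums with
  | nil => simp
  | cons a l ih =>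
    simp only [List.map_cons, List.sum_cons, Function.comp, ih, List.filter_cons]
    by_cases h : 2 ≤ nums.count a
    · have h2 : (2 : Int) ≤ ((nums.count a : Int)) := by exact_mod_cast h
      simp only [h2, if_pos, h, decide_true, List.length_cons]
      push_cast
      ring
    · have h2 : ¬ (2 : Int) ≤ ((nums.count a : Int)) := by exact_mod_cast h
      simp [h2, h]

-- ===== VERDICT (by name: the statement is the Claim_ definition above) =====
theorem count_repeating_spec : Claim_equal_count_repeating := by
  intro nums _
  unfold Spec_count_repeating
  rw [altB]
  show PySem.Set.len (nums.foldl pvStepA (PySem.Set.empty, PySem.Set.empty)).2 = _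
  have hperm :
      (nums.foldl pvStepA (PySem.Set.empty, PySem.Set.empty)).2.Perm
        ((PySem.Set.ofList nums).filter (fun x => decide (2 ≤ nums.count x))) := by
    rw [List.perm_ext_iff_of_nodup
      (nodup_snd_foldlA nums PySem.Set.empty PySem.Set.empty List.nodup_nil)
      ((PySem.Set.nodup_ofList nums).filter _)]
    intro x
    rw [mem_snd_foldlA, List.mem_filter, PySem.Set.mem_ofList]
    simp only [PySem.Set.empty, List.not_mem_nil, false_and, false_or, decide_eq_true_eq]
    constructor
    · intro h
      refine ⟨?_, h⟩
      by_contra hxm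
      simp [List.count_eq_zero_of_not_mem hxm] at h
    · exact fun h => h.2
  simp only [PySem.Set.len]
  exact_mod_cast hperm.length_eq
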